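-- pv_equiv track=rewrite | github.com/elanysk/leetcode | regularExpressions.py | patternToTokens
-- ===== SOURCE A (Python) =====
-- def patternToTokens(p):
--     tokens = []
--     for i, letter in enumerate(p):
--         if i == len(p)-1 and letter != '*':
--             tokens.append((letter, False))
--         else:
--             if letter != '*':
--                 tokens.append((letter, True if p[i+1]=='*' else False))
--     return tokens
-- ===== SOURCE B (Python) =====
-- def patternToTokens(p):
--     tokens = []
--     for ch in p:
--         if ch != '*':
--             tokens.append((ch, False))
--         elif tokens:
--             tokens[-1] = (tokens[-1][0], True)
--     return tokens
-- ===== Notes on version B (the rewrite author's own statement) =====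
-- stated objective: simpler
-- what changed: B tokenizes in one look-back pass (a '*' upgrades the previously emitted token) instead of A's indexed loop with enumerate, p[i+1] lookahead and a last-index special case.
import Mathlib
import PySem

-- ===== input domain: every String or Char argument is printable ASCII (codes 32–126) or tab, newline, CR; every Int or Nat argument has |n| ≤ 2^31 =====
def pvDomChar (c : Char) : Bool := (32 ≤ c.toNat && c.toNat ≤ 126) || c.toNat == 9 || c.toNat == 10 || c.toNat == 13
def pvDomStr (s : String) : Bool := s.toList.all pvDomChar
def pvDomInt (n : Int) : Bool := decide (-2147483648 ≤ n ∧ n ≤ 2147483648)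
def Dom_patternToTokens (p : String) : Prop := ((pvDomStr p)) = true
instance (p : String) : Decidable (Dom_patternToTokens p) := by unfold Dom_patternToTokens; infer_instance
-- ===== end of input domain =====

-- B replaces A's indexed lookahead loop by a one-pass look-back fold ('*' upgrades the last emitted token): simpler, same cost.

-- ===== PORT A =====
def patternToTokens (p : String) : List (String × Bool) :=
  (PySem.List.enumerate p.toList 0).foldl
    (fun tokens iw =>
      if iw.1 == (p.toList.length : Int) - 1 && iw.2 != '*' then
        tokens ++ [(String.ofList [iw.2], false)]
      else
        if iw.2 != '*' then
          tokens ++ [(String.ofList [iw.2], if PySem.List.pyGet? p.toList (iw.1 + 1) == some '*' then true else false)]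
        else tokens)
    []

-- ===== PORT B =====
-- tokens[-1] = (tokens[-1][0], True)
def pvSetLastTrue (ts : List (String × Bool)) : List (String × Bool) :=
  match ts with
  | [] => []
  | [(c, _)] => [(c, true)]
  | t :: rest => t :: pvSetLastTrue rest

def patternToTokens_alt (p : String) : List (String × Bool) :=
  p.toList.foldl
    (fun tokens ch =>
      if ch != '*' then tokens ++ [(String.ofList [ch], false)]
      else if tokens.isEmpty then tokens else pvSetLastTrue tokens)
    []

-- ===== PRECONDITION & SPEC =====
def Spec_patternToTokens (p : String) (out : List (String × Bool)) : Prop := out = patternToTokens_alt p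
instance (p : String) (out : List (String × Bool)) : Decidable (Spec_patternToTokens p out) := by unfold Spec_patternToTokens; infer_instance

-- ===== CLAIM (what is proved, stated in full; the proofs are below) =====
def Claim_equal_patternToTokens : Prop := ∀ (p : String), Dom_patternToTokens p → Spec_patternToTokens p (patternToTokens p)

-- ===== LEMMAS AND PROOFS =====

-- reference specification: tokens of a char list, flag = next char is '*'
def pvSpec : List Char → List (String × Bool)
  | [] => []
  | c :: rest =>
    if c = '*' then pvSpec rest
    else (String.ofList [c], rest.head? = some '*') :: pvSpec rest

theorem pvSetLastTrue_snoc (ts : List (String × Bool)) (c : String) (b : Bool) :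
    pvSetLastTrue (ts ++ [(c, b)]) = ts ++ [(c, true)] := by
  induction ts with
  | nil => rfl
  | cons t rest ih =>
    cases rest with
    | nil => simp [pvSetLastTrue]
    | cons u us => simp [pvSetLastTrue] at ih ⊢; exact ih

theorem foldB_snoc (rest : List Char) (ts : List (String × Bool)) (c : String) (b : Bool) :
    rest.foldl
      (fun tokens ch =>
        if ch != '*' then tokens ++ [(String.ofList [ch], false)]
        else if tokens.isEmpty then tokens else pvSetLastTrue tokens)
      (ts ++ [(c, b)])
      = ts ++ [(c, b || (rest.head? = some '*'))] ++ pvSpec rest := by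
  induction rest generalizing ts c b with
  | nil => simp [pvSpec]
  | cons ch r ih =>
    by_cases h : ch = '*'
    · subst h
      simp only [List.foldl_cons]
      rw [if_neg (by simp)]
      rw [if_neg (by simp)]
      rw [pvSetLastTrue_snoc]
      rw [ih]
      simp [pvSpec]
    · simp only [List.foldl_cons]
      rw [if_pos (by simp [h])]
      rw [ih]
      simp [pvSpec, h]

theorem foldB_nil (rest : List Char) :
    rest.foldl
      (fun tokens ch =>
        if ch != '*' then tokens ++ [(String.ofList [ch], false)]
        else if tokens.isEmpty then tokens else pvSetLastTrue tokens)
      [] = pvSpec rest := by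
  induction rest with
  | nil => rfl
  | cons ch r ih =>
    by_cases h : ch = '*'
    · subst h
      simp only [List.foldl_cons]
      rw [if_neg (by simp), if_pos (by simp)]
      rw [ih]; simp [pvSpec]
    · simp only [List.foldl_cons]
      rw [if_pos (by simp [h])]
      rw [foldB_snoc r [] (String.ofList [ch]) false]
      simp [pvSpec, h]

theorem B_eq_spec (p : String) : patternToTokens_alt p = pvSpec p.toList := by
  unfold patternToTokens_alt
  exact foldB_nil p.toList

-- A's fold over the enumerated suffix starting at index i equals acc ++ pvSpec of the suffix.
theorem foldA_suffix (s : List Char) (t : List Char) (i : Nat)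
    (hdrop : s.drop i = t) (hlen : i + t.length = s.length)
    (acc : List (String × Bool)) :
    (PySem.List.enumerate t (i : Int)).foldl
      (fun tokens iw =>
        if iw.1 == (s.length : Int) - 1 && iw.2 != '*' then
          tokens ++ [(String.ofList [iw.2], false)]
        else
          if iw.2 != '*' then
            tokens ++ [(String.ofList [iw.2], if PySem.List.pyGet? s (iw.1 + 1) == some '*' then true else false)]
          else tokens)
      acc = acc ++ pvSpec t := by
  induction t generalizing i acc with
  | nil => simp [PySem.List.enumerate, pvSpec]
  | cons letter r ih =>
    have hr : s.drop (i + 1) = r := by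
      have h1 : (s.drop i).drop 1 = r := by rw [hdrop]; simp
      simpa [List.drop_drop, Nat.add_comm] using h1
    have hlenr : (i + 1) + r.length = s.length := by
      simp at hlen; omega
    have hget : PySem.List.pyGet? s (((i + 1 : Nat)) : Int) = r.head? := by
      rw [PySem.List.pyGet?_natCast, ← List.head?_drop, hr]
    have hcast : (i : Int) + 1 = ((i + 1 : Nat) : Int) := by push_cast; ring
    rw [PySem.List.enumerate_cons, List.foldl_cons]
    by_cases hstar : letter = '*'
    · subst hstar
      rw [if_neg (by simp), if_neg (by simp)]
      rw [hcast, ih (i + 1) hr hlenr acc]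
      simp [pvSpec]
    · cases r with
      | nil =>
        have hieq : (i : Int) = (s.length : Int) - 1 := by
          simp at hlenr; omega
        rw [if_pos (by simp [hieq, hstar])]
        rw [PySem.List.enumerate_nil, List.foldl_nil]
        simp [pvSpec, hstar]
      | cons c' r' =>
        have hine : ¬ ((i : Int) = (s.length : Int) - 1) := by
          simp at hlenr; omega
        rw [if_neg (by simp [hine])]
        rw [if_pos (by simp [hstar])]
        rw [hcast, ih (i + 1) hr hlenr]
        rw [hget] at *
        simp only [pvSpec, if_neg hstar]
        rw [hget]
        by_cases hc : c' = '*' <;> simp [hc, List.head?]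

-- ===== VERDICT (by name: the statement is the Claim_ definition above) =====
theorem patternToTokens_spec : Claim_equal_patternToTokens := by
  intro p _
  unfold Spec_patternToTokens
  rw [B_eq_spec]
  unfold patternToTokens
  have := foldA_suffix p.toList p.toList 0 (by simp) (by simp) []
  simpa using this
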